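-- pv_equiv track=rewrite | github.com/ind1xa/utr | SimEnka.py | dohvatiNovoStanje
-- ===== SOURCE A (Python) =====
-- def dohvatiNovoStanje(velikaLista, stanja, znak):
--     rezultat = {*()}
--     for stanje in stanja:
--         for x in velikaLista:
--             if (x[0] == stanje and x[1] == znak):
--                 for y in range (2, len(x)):
--                     rezultat.add(x[y])
--
--     return rezultat;
-- ===== SOURCE B (Python) =====
-- def dohvatiNovoStanje(velikaLista, stanja, znak):
--     # Build an index: source state -> all target states of its transitions on `znak`,
--     # in one pass over the transition list; then look each current state up directly.
--     index = {}
--     for x in velikaLista: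
--         if len(x) >= 2 and x[1] == znak:
--             index.setdefault(x[0], []).extend(x[2:])
--     rezultat = set()
--     for stanje in stanja:
--         for y in index.get(stanje, []):
--             rezultat.add(y)
--     return rezultat
-- ===== Notes on version B (the rewrite author's own statement) =====
-- stated objective: faster
-- what changed: Replaces the nested states-by-transitions scan with a dictionary index from source state to targets built in one pass over the transition list, so each state is a single lookup instead of a full scan.
import Mathlib
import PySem

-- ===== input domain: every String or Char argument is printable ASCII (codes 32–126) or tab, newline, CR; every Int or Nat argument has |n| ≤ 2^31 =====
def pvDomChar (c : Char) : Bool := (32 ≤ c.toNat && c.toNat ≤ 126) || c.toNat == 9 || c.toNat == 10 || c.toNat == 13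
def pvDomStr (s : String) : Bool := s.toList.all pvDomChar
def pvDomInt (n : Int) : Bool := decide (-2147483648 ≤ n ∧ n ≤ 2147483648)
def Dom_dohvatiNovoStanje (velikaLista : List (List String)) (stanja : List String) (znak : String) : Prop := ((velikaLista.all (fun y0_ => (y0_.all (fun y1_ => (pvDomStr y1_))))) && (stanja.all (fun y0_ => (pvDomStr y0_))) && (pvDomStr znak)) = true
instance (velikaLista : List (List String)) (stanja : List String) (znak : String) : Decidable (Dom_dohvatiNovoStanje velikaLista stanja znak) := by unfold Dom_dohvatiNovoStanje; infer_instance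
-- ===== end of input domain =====

-- B replaces A's nested (states × transitions) scan with a dict index from source state to
-- targets built in one pass over the transition list; return value only (neither mutates).

-- ===== PORT A =====
-- Literal port of A: outer loop over stanja, inner loop over velikaLista, index loop
-- range(2, len(x)); pyGetD's default "" is only reached where the Python raises (outside Pre_).
def dohvatiNovoStanje (velikaLista : List (List String)) (stanja : List String) (znak : String) : List String :=
  stanja.foldl (fun rezultat stanje =>
    velikaLista.foldl (fun rezultat x =>
      if PySem.List.pyGetD x 0 "" = stanje ∧ PySem.List.pyGetD x 1 "" = znak then
        (PySem.List.pyRange 2 (PySem.List.len x) 1).foldl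
          (fun rezultat y => PySem.Set.add rezultat (PySem.List.pyGetD x y "")) rezultat
      else rezultat) rezultat) PySem.Set.empty

-- ===== PORT B =====
-- Literal port of Source B: build the dict index once, then look each state up.
def dohvatiNovoStanje_alt (velikaLista : List (List String)) (stanja : List String) (znak : String) : List String :=
  let index : PySem.Dict String (List String) :=
    velikaLista.foldl (fun index x =>
      if 2 ≤ x.length ∧ PySem.List.pyGetD x 1 "" = znak then
        index.modify (PySem.List.pyGetD x 0 "") [] (fun v => v ++ PySem.List.slice x (some 2) none)
      else index) PySem.Dict.empty
  stanja.foldl (fun rezultat stanje =>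
    (index.getD stanje []).foldl (fun rezultat y => PySem.Set.add rezultat y) rezultat)
    PySem.Set.empty

-- ===== PRECONDITION & SPEC =====
-- Pre_ excludes exactly the inputs on which A raises IndexError: a nonempty stanja together
-- with an empty transition, or a length-1 transition whose state occurs in stanja.
def Pre_dohvatiNovoStanje (velikaLista : List (List String)) (stanja : List String) (znak : String) : Prop :=
  stanja = [] ∨ ∀ x ∈ velikaLista, x ≠ [] ∧ (x.length = 1 → x.headD "" ∉ stanja)

instance (velikaLista : List (List String)) (stanja : List String) (znak : String) : Decidable (Pre_dohvatiNovoStanje velikaLista stanja znak) := by unfold Pre_dohvatiNovoStanje; infer_instance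

def pvWitness_dohvatiNovoStanje : List (List String) × List String × String :=
  ([["a", "b", "c"], ["q", "b", "d"]], ["a", "q"], "b")

def Spec_dohvatiNovoStanje (velikaLista : List (List String)) (stanja : List String) (znak : String) (out : List String) : Prop := out = dohvatiNovoStanje_alt velikaLista stanja znak
instance (velikaLista : List (List String)) (stanja : List String) (znak : String) (out : List String) : Decidable (Spec_dohvatiNovoStanje velikaLista stanja znak out) := by unfold Spec_dohvatiNovoStanje; infer_instance

-- ===== CLAIM (what is proved, stated in full; the proofs are below) =====
def Claim_equal_dohvatiNovoStanje : Prop := ∀ (velikaLista : List (List String)) (stanja : List String) (znak : String), Dom_dohvatiNovoStanje velikaLista stanja znak → Pre_dohvatiNovoStanje velikaLista stanja znak → Spec_dohvatiNovoStanje velikaLista stanja znak (dohvatiNovoStanje velikaLista stanja znak)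


-- ===== LEMMAS AND PROOFS =====

-- Per-state contribution of a transition, A's test and B's test.
def pvContribA (znak stanje : String) (x : List String) : List String :=
  if PySem.List.pyGetD x 0 "" = stanje ∧ PySem.List.pyGetD x 1 "" = znak then x.drop 2 else []
def pvContribB (znak stanje : String) (x : List String) : List String :=
  if 2 ≤ x.length ∧ PySem.List.pyGetD x 1 "" = znak then
    (if PySem.List.pyGetD x 0 "" = stanje then x.drop 2 else []) else []

lemma foldl_flatMap_eq {α β σ : Type} (l : List α) (h : α → List β) (step : σ → β → σ) (init : σ) :
    (l.flatMap h).foldl step init = l.foldl (fun acc x => (h x).foldl step acc) init := by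
  induction l generalizing init with
  | nil => rfl
  | cons a t ih => simp [List.foldl_append, ih]

-- A's inner loop over velikaLista, for one state, folds the flatMap of pvContribA.
lemma innerA_eq (velikaLista : List (List String)) (znak stanje : String) (r : List String) :
    velikaLista.foldl (fun rezultat x =>
      if PySem.List.pyGetD x 0 "" = stanje ∧ PySem.List.pyGetD x 1 "" = znak then
        (PySem.List.pyRange 2 (PySem.List.len x) 1).foldl
          (fun rezultat y => PySem.Set.add rezultat (PySem.List.pyGetD x y "")) rezultat
      else rezultat) r
    = (velikaLista.flatMap (pvContribA znak stanje)).foldl PySem.Set.add r := by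
  rw [foldl_flatMap_eq]
  apply PySem.List.foldl_congr_mem
  intro acc x _
  by_cases h : PySem.List.pyGetD x 0 "" = stanje ∧ PySem.List.pyGetD x 1 "" = znak
  · simp only [pvContribA, if_pos h]
    have := PySem.List.foldl_pyRange_pyGetD (xs := x) (a := 2) (d := "")
      (f := PySem.Set.add) (init := acc) (by norm_num)
    simpa using this
  · simp [pvContribA, h]

-- B's index lookup is the flatMap of pvContribB.
lemma index_getD (znak : String) (l : List (List String)) (d : PySem.Dict String (List String)) (k : String) :
    (l.foldl (fun index x =>
      if 2 ≤ x.length ∧ PySem.List.pyGetD x 1 "" = znak then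
        index.modify (PySem.List.pyGetD x 0 "") [] (fun v => v ++ PySem.List.slice x (some 2) none)
      else index) d).getD k []
    = d.getD k [] ++ l.flatMap (pvContribB znak k) := by
  induction l generalizing d with
  | nil => simp
  | cons x t ih =>
    rw [List.foldl_cons, List.flatMap_cons]
    by_cases h : 2 ≤ x.length ∧ PySem.List.pyGetD x 1 "" = znak
    · rw [if_pos h, ih, PySem.Dict.getD_modify]
      unfold pvContribB
      rw [if_pos h]
      by_cases hk : k = PySem.List.pyGetD x 0 ""
      · have hs : PySem.List.slice x (some 2) none = x.drop 2 :=
          PySem.List.slice_from_natCast (a := 2) (xs := x)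
        rw [if_pos hk, if_pos hk.symm, hs, hk, List.append_assoc]
      · rw [if_neg hk, if_neg (fun h' => hk h'.symm), List.nil_append]
    · rw [if_neg h, ih]
      unfold pvContribB
      rw [if_neg h, List.nil_append]

-- Under Pre_, for a state occurring in stanja the two tests select the same transitions.
lemma contrib_eq (velikaLista : List (List String)) (stanja : List String) (znak : String)
    (hp : ∀ x ∈ velikaLista, x ≠ [] ∧ (x.length = 1 → x.headD "" ∉ stanja))
    (stanje : String) (hs : stanje ∈ stanja) :
    velikaLista.flatMap (pvContribA znak stanje) = velikaLista.flatMap (pvContribB znak stanje) := by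
  apply List.flatMap_congr
  intro x hx
  rcases hp x hx with ⟨hnil, h1⟩
  unfold pvContribA pvContribB
  by_cases hA : PySem.List.pyGetD x 0 "" = stanje ∧ PySem.List.pyGetD x 1 "" = znak
  · have hhead : PySem.List.pyGetD x 0 "" = x.headD "" := by
      cases x with
      | nil => exact absurd rfl hnil
      | cons a t => simp
    have hlen : 2 ≤ x.length := by
      by_contra hl
      push Not at hl
      rcases (by omega : x.length = 0 ∨ x.length = 1) with h0 | h1'
      · exact hnil (List.length_eq_zero_iff.mp h0)
      · exact (h1 h1') (by rw [← hhead, hA.1]; exact hs)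
    rw [if_pos hA, if_pos ⟨hlen, hA.2⟩, if_pos hA.1]
  · rw [if_neg hA]
    by_cases hB : 2 ≤ x.length ∧ PySem.List.pyGetD x 1 "" = znak
    · rw [if_pos hB]
      rw [if_neg (fun h0 => hA ⟨h0, hB.2⟩)]
    · rw [if_neg hB]


-- ===== VERDICT (by name: the statement is the Claim_ definition above) =====
theorem dohvatiNovoStanje_spec : Claim_equal_dohvatiNovoStanje := by
  intro velikaLista stanja znak _ hpre
  unfold Spec_dohvatiNovoStanje dohvatiNovoStanje dohvatiNovoStanje_alt
  rcases hpre with h | h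
  · subst h; rfl
  · simp only []
    apply PySem.List.foldl_congr_mem
    intro acc stanje hmem
    rw [innerA_eq, index_getD, PySem.Dict.getD_empty, List.nil_append,
        contrib_eq velikaLista stanja znak h stanje hmem]
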